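-- pv_equiv track=rewrite | github.com/nanajin/CodingTest_For_Practicing | 프로그래머스/unrated/161989. 덧칠하기/덧칠하기.py | solution
-- ===== SOURCE A (Python) =====
-- def solution(n, m, section):
--     l = []
--     cnt  = 1
--     init = 0
--     painted = []
--     while 1:
--         if len(painted) == len(section):
--             break
--         last = section[init] + m - 1
--         for i in range(init, len(section)):
--             if section[i] <= last:
--                 painted.append(section[i])
--                 continue
--             cnt += 1
--             init = i
--             break
--     # while 1:
--     #     if len(section) == 0:
--     #         break
--     #     for i in section:
--     #         if i in range(section[0],section[0]+m):
--     #             copy.remove(i)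
--     #     section = copy
--     #     cnt += 1
--     return cnt
-- ===== SOURCE B (Python) =====
-- def solution(n, m, section):
--     cnt = 1
--     end = section[0] + m - 1 if section else 0
--     for s in section[1:]:
--         if s > end:
--             cnt += 1
--             end = s + m - 1
--     return cnt
-- ===== Notes on version B (the rewrite author's own statement) =====
-- stated objective: simpler
-- what changed: Replaced A's restart-from-init while/for structure with its painted accumulator list by one linear pass keeping just a counter and the current coverage boundary.
import Mathlib
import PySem

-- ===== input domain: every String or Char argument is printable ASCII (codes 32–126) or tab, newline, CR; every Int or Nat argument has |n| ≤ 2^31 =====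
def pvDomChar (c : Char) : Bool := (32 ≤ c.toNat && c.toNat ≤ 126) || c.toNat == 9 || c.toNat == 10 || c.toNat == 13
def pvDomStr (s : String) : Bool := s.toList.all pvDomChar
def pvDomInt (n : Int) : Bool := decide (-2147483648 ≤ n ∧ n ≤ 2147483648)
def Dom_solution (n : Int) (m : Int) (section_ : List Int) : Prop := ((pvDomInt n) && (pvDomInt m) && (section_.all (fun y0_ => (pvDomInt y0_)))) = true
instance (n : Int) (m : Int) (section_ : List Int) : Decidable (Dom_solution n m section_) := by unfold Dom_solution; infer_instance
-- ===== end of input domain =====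

-- B replaces A's restart-from-init while/for structure (and its painted list) with one linear pass
-- keeping a counter and the current coverage boundary; simpler, O(1) extra space.


-- ===== PORT A =====
-- inner `for i in range(init, len(section))` loop: returns (painted, cnt, init, broke)
def innerA (sec : List Int) (last cnt : Int) (painted : List Int) (i : Nat) :
    List Int × Int × Nat × Bool :=
  if h : i < sec.length then
    if sec[i] ≤ last then innerA sec last cnt (painted ++ [sec[i]]) (i + 1)
    else (painted, cnt + 1, i, true)
  else (painted, cnt, 0, false)
termination_by sec.length - i

-- outer `while 1` loop; the fuel only makes the port total: under Pre_ (m ≥ 1 or empty list)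
-- `sec.length + 1` iterations always suffice (painted grows every round), so behaviour is Python's.
-- `section[init]` is always in range (init = 0 or a break index), ported as getD.
def outerA (sec : List Int) (m : Int) : Nat → Int → Nat → List Int → Int
  | 0, cnt, _, _ => cnt
  | fuel + 1, cnt, init, painted =>
    if painted.length = sec.length then cnt
    else
      match innerA sec (sec.getD init 0 + m - 1) cnt painted init with
      | (p, c, i, _) => outerA sec m fuel c i p

def solution (n : Int) (m : Int) (section_ : List Int) : Int :=
  outerA section_ m (section_.length + 1) 1 0 []

-- ===== PORT B =====
def solution_alt (n : Int) (m : Int) (section_ : List Int) : Int :=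
  let end0 : Int := match section_ with | [] => 0 | s :: _ => s + m - 1
  ((section_.drop 1).foldl
    (fun (st : Int × Int) x => if x > st.2 then (st.1 + 1, x + m - 1) else st)
    (1, end0)).1

-- ===== PRECONDITION & SPEC =====
-- Pre_ excludes nonempty section with m ≤ 0: there A's inner loop breaks with init unchanged
-- (section[init] > section[init]+m-1), so the Python while-loop never terminates (A never returns).
def Pre_solution (n : Int) (m : Int) (section_ : List Int) : Prop :=
  section_ = [] ∨ 1 ≤ m
instance (n : Int) (m : Int) (section_ : List Int) : Decidable (Pre_solution n m section_) := by unfold Pre_solution; infer_instance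

def pvWitness_solution : Int × Int × List Int := (8, 4, [2, 4, 3, 8])

def Spec_solution (n : Int) (m : Int) (section_ : List Int) (out : Int) : Prop := out = solution_alt n m section_
instance (n : Int) (m : Int) (section_ : List Int) (out : Int) : Decidable (Spec_solution n m section_ out) := by unfold Spec_solution; infer_instance

-- ===== CLAIM (what is proved, stated in full; the proofs are below) =====
def Claim_equal_solution : Prop := ∀ (n : Int) (m : Int) (section_ : List Int), Dom_solution n m section_ → Pre_solution n m section_ → Spec_solution n m section_ (solution n m section_)

-- ===== LEMMAS AND PROOFS =====

-- B's fold step, named for the proofs below (definitionally B's lambda).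
def stepB (m : Int) (st : Int × Int) (x : Int) : Int × Int :=
  if x > st.2 then (st.1 + 1, x + m - 1) else st

theorem solution_alt_eq (n m : Int) (sec : List Int) :
    solution_alt n m sec =
      ((sec.drop 1).foldl (stepB m)
        (1, match sec with | [] => 0 | s :: _ => s + m - 1)).1 := by
  cases sec <;> rfl

-- a fold whose elements never exceed the boundary leaves the state unchanged
theorem fold_none (m : Int) (l : List Int) (cnt last : Int)
    (h : ∀ x ∈ l, ¬ last < x) : l.foldl (stepB m) (cnt, last) = (cnt, last) := by
  induction l with
  | nil => rfl
  | cons a t ih =>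
    have ha : ¬ (a > last) := h a (by simp)
    simp only [List.foldl_cons, stepB, if_neg ha]
    exact ih (fun x hx => h x (by simp [hx]))

-- skipping up to the first element beyond the boundary
theorem fold_skip (m : Int) (l : List Int) (cnt last : Int) (k : Nat)
    (h : l.findIdx? (fun x => decide (last < x)) = some k) :
    l.foldl (stepB m) (cnt, last) =
      (l.drop (k + 1)).foldl (stepB m) (cnt + 1, l.getD k 0 + m - 1) := by
  induction l generalizing k cnt with
  | nil => simp at h
  | cons a t ih =>
    rw [List.findIdx?_cons] at h
    by_cases ha : last < a
    · have hk0 : k = 0 := by simp [ha] at h; omega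
      subst hk0
      simp [List.foldl_cons, stepB, ha, List.getD]
    · have h' : (t.findIdx? (fun x => decide (last < x))).map (· + 1) = some k := by
        simpa [ha] using h
      obtain ⟨k', hk', rfl⟩ := Option.map_eq_some_iff.mp h'
      have hstep : stepB m (cnt, last) a = (cnt, last) := by simp [stepB, ha]
      rw [List.foldl_cons, hstep, ih cnt k' hk']
      simp [List.getD]

-- characterization of A's inner for-loop in terms of the first index beyond the boundary
theorem innerA_char (sec : List Int) (last cnt : Int) :
    ∀ d i painted, sec.length - i = d → i ≤ sec.length →
      innerA sec last cnt painted i =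
        match (sec.drop i).findIdx? (fun x => decide (last < x)) with
        | none => (painted ++ sec.drop i, cnt, 0, false)
        | some k => (painted ++ (sec.drop i).take k, cnt + 1, i + k, true) := by
  intro d
  induction d with
  | zero =>
    intro i painted hd hi
    have : i = sec.length := by omega
    subst this
    rw [innerA, dif_neg (by omega)]
    simp
  | succ d IH =>
    intro i painted hd hi
    have h : i < sec.length := by omega
    have hdrop : sec.drop i = sec[i] :: sec.drop (i + 1) := List.drop_eq_getElem_cons h
    rw [innerA, dif_pos h]
    by_cases hle : sec[i] ≤ last
    · rw [if_pos hle]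
      rw [IH (i + 1) (painted ++ [sec[i]]) (by omega) (by omega)]
      rw [hdrop, List.findIdx?_cons]
      have hlt : ¬ last < sec[i] := not_lt.mpr hle
      rw [decide_eq_false hlt]
      simp only [Bool.false_eq_true, if_neg not_false]
      cases hfi : (sec.drop (i + 1)).findIdx? (fun x => decide (last < x)) with
      | none => simp
      | some k =>
        simp only [Option.map_some]
        simp only [List.take_succ_cons, List.append_assoc, List.singleton_append,
          show i + 1 + k = i + (k + 1) from by omega]
    · rw [if_neg hle]
      rw [hdrop, List.findIdx?_cons]
      have hlt : last < sec[i] := not_le.mp hle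
      rw [decide_eq_true hlt]
      simp

-- the main correspondence: A's outer loop from state (cnt, init = j, |painted| = j)
-- computes B's fold over the suffix after j, started at boundary sec[j] + m - 1
theorem main_lemma (sec : List Int) (m : Int) (hm : 1 ≤ m) :
    ∀ fuel j cnt (painted : List Int), painted.length = j → j < sec.length →
      sec.length - j + 1 ≤ fuel →
      outerA sec m fuel cnt j painted =
        ((sec.drop (j + 1)).foldl (stepB m) (cnt, sec.getD j 0 + m - 1)).1 := by
  intro fuel
  induction fuel with
  | zero => intro j cnt painted _ _ hf; omega
  | succ f IH =>
    intro j cnt painted hp hj hf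
    have hget : sec.getD j 0 = sec[j] := List.getD_eq_getElem _ _ hj
    rw [outerA, if_neg (by omega)]
    have hchar := innerA_char sec (sec.getD j 0 + m - 1) cnt (sec.length - j) j painted rfl (by omega)
    have hdrop : sec.drop j = sec[j] :: sec.drop (j + 1) := List.drop_eq_getElem_cons hj
    rw [hdrop, List.findIdx?_cons] at hchar
    have hhead : ¬ (sec.getD j 0 + m - 1 < sec[j]) := by rw [hget]; omega
    rw [decide_eq_false hhead] at hchar
    simp only [Bool.false_eq_true, if_neg not_false] at hchar
    cases hfi : (sec.drop (j + 1)).findIdx? (fun x => decide (sec.getD j 0 + m - 1 < x)) with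
    | none =>
      rw [hfi] at hchar
      simp only [Option.map_none] at hchar
      rw [hchar]
      show outerA sec m f cnt 0 (painted ++ sec[j] :: List.drop (j + 1) sec) =
        ((List.drop (j + 1) sec).foldl (stepB m) (cnt, sec.getD j 0 + m - 1)).1
      -- outer loop: painted now complete, next round breaks returning cnt
      obtain ⟨f', rfl⟩ : ∃ f', f = f' + 1 := ⟨f - 1, by omega⟩
      rw [outerA, if_pos (by simp [hp]; omega)]
      -- RHS: no element exceeds the boundary, fold is the identity on the state
      rw [fold_none m _ _ _ (by
        intro x hx
        simpa using List.findIdx?_eq_none_iff.mp hfi x hx)]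
    | some k =>
      rw [hfi] at hchar
      simp only [Option.map_some] at hchar
      rw [hchar]
      show outerA sec m f (cnt + 1) (j + (k + 1))
          (painted ++ (sec[j] :: List.drop (j + 1) sec).take (k + 1)) =
        ((List.drop (j + 1) sec).foldl (stepB m) (cnt, sec.getD j 0 + m - 1)).1
      have hklt : k < (sec.drop (j + 1)).length := by
        have := List.findIdx?_eq_some_iff_findIdx_eq.mp hfi
        omega
      have hlen : (sec.drop (j + 1)).length = sec.length - (j + 1) := List.length_drop ..
      have hplen : (painted ++ (sec[j] :: sec.drop (j + 1)).take (k + 1)).length = j + (k + 1) := by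
        simp [hp]; omega
      have hj' : j + (k + 1) < sec.length := by omega
      rw [IH (j + (k + 1)) (cnt + 1) _ hplen hj' (by omega)]
      rw [fold_skip m _ cnt _ k hfi]
      congr 2
      · rw [List.getD_eq_getElem _ _ (by omega : j + (k + 1) < sec.length),
          List.getD_eq_getElem _ _ hklt, List.getElem_drop]
        simp only [show j + 1 + k = j + (k + 1) from by omega]
      · rw [List.drop_drop]
        congr 1
        omega

-- ===== VERDICT (by name: the statement is the Claim_ definition above) =====
theorem solution_spec : Claim_equal_solution := by
  intro n m sec _ hpre
  unfold Spec_solution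
  rcases hpre with rfl | hm
  · rfl
  · cases sec with
    | nil => rfl
    | cons s t =>
      rw [solution_alt_eq, solution,
        main_lemma (s :: t) m hm ((s :: t).length + 1) 0 1 [] rfl (by simp) (by omega)]
      rfl
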